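-- pv_equiv track=rewrite | github.com/fernandezaguilardani87-rgb/update-kh | property_manager.py | _fuzzy_word_in_text
-- ===== SOURCE A (Python) =====
-- def _fuzzy_word_in_text(word: str, text_tokens: list[str]) -> bool:
--     """
--     Comprueba si `word` aparece en la lista de tokens del texto, con tolerancia
--     a un error tipográfico (distancia de edición ≤ 1) para palabras largas (≥ 6 chars).
--     """
--     if word in text_tokens or any(word in tok for tok in text_tokens):
--         return True
--     if len(word) < 6:
--         return False
--     # Distancia de edición ≤ 1 (inserción / eliminación / sustitución)
--     for tok in text_tokens:
--         if abs(len(tok) - len(word)) > 1: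
--             continue
--         if len(tok) == len(word):          # Sustitución
--             if sum(a != b for a, b in zip(tok, word)) <= 1:
--                 return True
--         else:                              # Inserción / eliminación
--             longer, shorter = (tok, word) if len(tok) > len(word) else (word, tok)
--             for i in range(len(longer)):
--                 if longer[:i] + longer[i+1:] == shorter:
--                     return True
--     return False
-- ===== SOURCE B (Python) =====
-- def _within_one_edit(a: str, b: str) -> bool:
--     """True iff edit distance between a and b is <= 1 (two-pointer walk)."""
--     if abs(len(a) - len(b)) > 1:
--         return False
--     if len(a) > len(b):
--         a, b = b, a
--     same_len = len(a) == len(b)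
--     i = j = 0
--     used = False
--     while i < len(a) and j < len(b):
--         if a[i] == b[j]:
--             i += 1
--             j += 1
--         elif used:
--             return False
--         else:
--             used = True
--             j += 1
--             if same_len:
--                 i += 1
--     return True
--
--
-- def _fuzzy_word_in_text(word: str, text_tokens: list[str]) -> bool:
--     # substring check subsumes exact membership (word in word)
--     if any(word in tok for tok in text_tokens):
--         return True
--     if len(word) < 6:
--         return False
--     return any(_within_one_edit(word, tok) for tok in text_tokens)
-- ===== Notes on version B (the rewrite author's own statement) =====
-- stated objective: simpler
-- what changed: Replaces A's two separate per-token branches (hamming count over zip for equal lengths, and a slice-rebuild loop over all deletion positions for length difference 1) with one uniform two-pointer edit-distance<=1 walk carrying a 'mismatch used' flag, and drops the exact-membership disjunct subsumed by the substring check.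
import Mathlib
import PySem

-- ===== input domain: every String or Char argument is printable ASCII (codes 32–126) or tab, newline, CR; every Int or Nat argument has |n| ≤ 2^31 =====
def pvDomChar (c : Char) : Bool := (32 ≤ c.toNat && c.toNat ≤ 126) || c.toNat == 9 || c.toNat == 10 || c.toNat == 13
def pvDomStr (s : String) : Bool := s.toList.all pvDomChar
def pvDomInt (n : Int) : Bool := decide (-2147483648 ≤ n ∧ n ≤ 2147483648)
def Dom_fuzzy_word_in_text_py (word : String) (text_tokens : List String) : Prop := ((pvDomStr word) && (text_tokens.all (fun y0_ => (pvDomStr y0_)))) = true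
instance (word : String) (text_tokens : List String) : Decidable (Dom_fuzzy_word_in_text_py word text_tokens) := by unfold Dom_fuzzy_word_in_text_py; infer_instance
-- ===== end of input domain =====

-- B replaces A's two per-token branches (hamming count / slice-rebuild deletion scan)
-- with one uniform two-pointer edit-distance ≤ 1 walk; objective: simpler.

-- ===== PORT A =====
-- sum(a != b for a, b in zip(tok, word))
def pvHam (t w : List Char) : Nat :=
  ((t.zip w).map (fun p => if p.1 ≠ p.2 then 1 else 0)).sum

-- the second loop of A: per token, substitution / insertion-deletion checks, early return True
def pvALoop (w : List Char) : List (List Char) → Bool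
  | [] => false
  | t :: rest =>
    if ((t.length : Int) - (w.length : Int)).natAbs > 1 then pvALoop w rest
    else if t.length = w.length then
      if pvHam t w ≤ 1 then true else pvALoop w rest
    else
      -- longer, shorter = (tok, word) if len(tok) > len(word) else (word, tok); p = (longer, shorter)
      if (PySem.List.pyRange 0 ((if t.length > w.length then (t, w) else (w, t)).1.length : Int) 1).any
           (fun i => (PySem.List.slice (if t.length > w.length then (t, w) else (w, t)).1 none (some i) ++
             PySem.List.slice (if t.length > w.length then (t, w) else (w, t)).1 (some (i + 1)) none) ==
             (if t.length > w.length then (t, w) else (w, t)).2)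
      then true else pvALoop w rest

def fuzzy_word_in_text_py (word : String) (text_tokens : List String) : Bool :=
  let w := word.toList
  let ts := text_tokens.map String.toList
  if ts.contains w || ts.any (fun t => PySem.Chars.isIn w t) then true
  else if w.length < 6 then false
  else pvALoop w ts

-- ===== PORT B =====
-- the while loop of _within_one_edit: two pointers, 'one mismatch used' flag
def pvWalk (sameLen : Bool) : List Char → List Char → Bool → Bool
  | [], _, _ => true
  | _ :: _, [], _ => true
  | x :: a, y :: b, used =>
    if x = y then pvWalk sameLen a b used
    else if used then false
    else if sameLen then pvWalk sameLen a b true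
    else pvWalk sameLen (x :: a) b true
  termination_by _ b _ => b.length

def pvWithinOneEdit (a b : List Char) : Bool :=
  if ((a.length : Int) - (b.length : Int)).natAbs > 1 then false
  else
    let p := if a.length > b.length then (b, a) else (a, b)
    pvWalk (p.1.length == p.2.length) p.1 p.2 false

def fuzzy_word_in_text_py_alt (word : String) (text_tokens : List String) : Bool :=
  let w := word.toList
  let ts := text_tokens.map String.toList
  if ts.any (fun t => PySem.Chars.isIn w t) then true
  else if w.length < 6 then false
  else ts.any (fun t => pvWithinOneEdit w t)

-- ===== PRECONDITION & SPEC =====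
def Spec_fuzzy_word_in_text_py (word : String) (text_tokens : List String) (out : Bool) : Prop := out = fuzzy_word_in_text_py_alt word text_tokens
instance (word : String) (text_tokens : List String) (out : Bool) : Decidable (Spec_fuzzy_word_in_text_py word text_tokens out) := by unfold Spec_fuzzy_word_in_text_py; infer_instance

-- ===== CLAIM (what is proved, stated in full; the proofs are below) =====
def Claim_equal_fuzzy_word_in_text_py : Prop := ∀ (word : String) (text_tokens : List String), Dom_fuzzy_word_in_text_py word text_tokens → Spec_fuzzy_word_in_text_py word text_tokens (fuzzy_word_in_text_py word text_tokens)

-- ===== LEMMAS AND PROOFS =====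

-- with the mismatch already used, the walk just checks equality (lengths equal)
theorem pvWalk_used (s : Bool) : ∀ (a b : List Char), a.length = b.length →
    pvWalk s a b true = (a == b) := by
  intro a
  induction a with
  | nil => intro b h; cases b <;> simp_all [pvWalk]
  | cons x a ih =>
    intro b h
    cases b with
    | nil => simp at h
    | cons y b =>
      simp only [List.length_cons, Nat.add_right_cancel_iff] at h
      by_cases hxy : x = y
      · simp [pvWalk, hxy, ih b h]
      · simp [pvWalk, hxy]

theorem pvHam_zero_iff : ∀ (a b : List Char), a.length = b.length →
    (pvHam a b = 0 ↔ a = b) := by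
  intro a
  induction a with
  | nil => intro b h; cases b <;> simp_all [pvHam]
  | cons x a ih =>
    intro b h
    cases b with
    | nil => simp at h
    | cons y b =>
      simp only [List.length_cons, Nat.add_right_cancel_iff] at h
      by_cases hxy : x = y
      · simpa [pvHam, hxy] using ih b h
      · simp [pvHam, hxy]

theorem pvHam_comm : ∀ (a b : List Char), pvHam a b = pvHam b a := by
  intro a
  induction a with
  | nil => intro b; cases b <;> simp [pvHam]
  | cons x a ih =>
    intro b
    cases b with
    | nil => simp [pvHam]
    | cons y b =>
      have hrec := ih b
      simp only [pvHam, List.zip_cons_cons, List.map_cons, List.sum_cons] at hrec ⊢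
      rw [hrec]
      by_cases hxy : x = y <;> simp [hxy, ne_comm]

-- equal lengths, flag free: the walk decides hamming distance ≤ 1
theorem pvWalk_subst : ∀ (a b : List Char), a.length = b.length →
    pvWalk true a b false = decide (pvHam a b ≤ 1) := by
  intro a
  induction a with
  | nil => intro b h; cases b <;> simp_all [pvWalk, pvHam]
  | cons x a ih =>
    intro b h
    cases b with
    | nil => simp at h
    | cons y b =>
      simp only [List.length_cons, Nat.add_right_cancel_iff] at h
      by_cases hxy : x = y
      · simp [pvWalk, pvHam, hxy, ih b h]
      · have hham : pvHam (x :: a) (y :: b) = 1 + pvHam a b := by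
          simp [pvHam, hxy]
        have hwu := pvWalk_used true a b h
        have heq : pvWalk true (x :: a) (y :: b) false = pvWalk true a b true := by
          simp [pvWalk, hxy]
        rw [heq, hwu, hham]
        by_cases hab : a = b
        · rw [hab, (pvHam_zero_iff b b rfl).mpr rfl]
          simp
        · have hne : pvHam a b ≠ 0 := fun hc => hab ((pvHam_zero_iff a b h).mp hc)
          have hgt : ¬ (1 + pvHam a b ≤ 1) := by omega
          simp [hab, hgt]

-- one extra char in b, flag free: the walk decides "deleting one char of b yields a"
theorem pvWalk_del : ∀ (a b : List Char), b.length = a.length + 1 →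
    pvWalk false a b false =
      (List.range b.length).any (fun i => (b.take i ++ b.drop (i + 1)) == a) := by
  intro a
  induction a with
  | nil =>
    intro b h
    cases b with
    | nil => simp at h
    | cons y rest =>
      have hr : rest = [] := by simpa using h
      subst hr
      simp [pvWalk, List.range_succ]
  | cons x a ih =>
    intro b h
    cases b with
    | nil => simp at h
    | cons y b =>
      simp only [List.length_cons, Nat.add_right_cancel_iff] at h
      have hrange : List.range (y :: b).length = 0 :: (List.range b.length).map (· + 1) := by
        simp [List.length_cons, List.range_succ_eq_map]
      have hstep : ∀ i : Nat,
          ((y :: b).take (i + 1) ++ (y :: b).drop (i + 1 + 1)) = y :: (b.take i ++ b.drop (i + 1)) := by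
        intro i; simp
      by_cases hxy : x = y
      · subst hxy
        have heq : pvWalk false (x :: a) (x :: b) false = pvWalk false a b false := by
          simp [pvWalk]
        rw [heq, ih b h, hrange]
        simp only [List.any_cons, List.any_map, Function.comp_def]
        by_cases hb : b = x :: a
        · have hL : ((List.range b.length).any (fun i => (b.take i ++ b.drop (i + 1)) == a)) = true := by
            refine List.any_eq_true.mpr ⟨0, by simp [hb], ?_⟩
            rw [hb]; simp
          have h0 : (((x :: b).take 0 ++ (x :: b).drop (0 + 1)) == (x :: a)) = true := by
            rw [hb]; simp
          rw [hL, h0]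
          simp
        · have h0 : (((x :: b).take 0 ++ (x :: b).drop (0 + 1)) == (x :: a)) = false := by
            simp [hb]
          rw [h0, Bool.false_or]
          apply congrArg
          funext i
          rw [hstep i]
          simp
      · have hyx : y ≠ x := Ne.symm hxy
        have heq : pvWalk false (x :: a) (y :: b) false = pvWalk false (x :: a) b true := by
          simp [pvWalk, hxy]
        have hlen : (x :: a).length = b.length := by simp [h]
        rw [heq, pvWalk_used false (x :: a) b hlen, hrange]
        simp only [List.any_cons, List.any_map, Function.comp_def]
        have hinner : ((List.range b.length).any
            (fun i => ((y :: b).take (i + 1) ++ (y :: b).drop (i + 1 + 1)) == (x :: a))) = false := by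
          simp only [List.any_eq_false]
          intro i _
          rw [hstep i]
          simp [hyx]
        rw [hinner, Bool.or_false]
        simp [eq_comm]

-- bridge: A's pyRange/slice deletion scan is the List.range take/drop scan
theorem pvSliceScan (l s : List Char) :
    ((PySem.List.pyRange 0 (l.length : Int) 1).any
      (fun i => (PySem.List.slice l none (some i) ++ PySem.List.slice l (some (i + 1)) none) == s)) =
    ((List.range l.length).any (fun i => (l.take i ++ l.drop (i + 1)) == s)) := by
  rw [PySem.List.pyRange_one]
  simp only [Int.sub_zero, Int.toNat_natCast, List.any_map, Function.comp_def]
  apply congrArg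
  funext k
  have h1 : PySem.List.slice l none (some ((0 : Int) + (k : Int))) = l.take k := by
    rw [Int.zero_add]; exact PySem.List.slice_to_natCast l k
  have h2 : PySem.List.slice l (some ((0 : Int) + (k : Int) + 1)) none = l.drop (k + 1) := by
    rw [Int.zero_add]
    have hc : (k : Int) + 1 = ((k + 1 : Nat) : Int) := by push_cast; ring
    rw [hc]; exact PySem.List.slice_from_natCast l (k + 1)
  rw [h1, h2]

-- per token, A's branch decision equals B's unified two-pointer check
theorem pvPerToken (w t : List Char) :
    (if ((t.length : Int) - (w.length : Int)).natAbs > 1 then false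
     else if t.length = w.length then decide (pvHam t w ≤ 1)
     else
       (PySem.List.pyRange 0 ((if t.length > w.length then (t, w) else (w, t)).1.length : Int) 1).any
         (fun i => (PySem.List.slice (if t.length > w.length then (t, w) else (w, t)).1 none (some i) ++
           PySem.List.slice (if t.length > w.length then (t, w) else (w, t)).1 (some (i + 1)) none) ==
           (if t.length > w.length then (t, w) else (w, t)).2))
    = pvWithinOneEdit w t := by
  unfold pvWithinOneEdit
  have habs : (((t.length : Int) - (w.length : Int)).natAbs > 1) ↔
      (((w.length : Int) - (t.length : Int)).natAbs > 1) := by omega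
  by_cases hgap : ((t.length : Int) - (w.length : Int)).natAbs > 1
  · rw [if_pos hgap, if_pos (habs.mp hgap)]
  · rw [if_neg hgap, if_neg (fun hc => hgap (habs.mpr hc))]
    by_cases heq : t.length = w.length
    · rw [if_pos heq, if_neg (show ¬ w.length > t.length by omega)]
      show decide (pvHam t w ≤ 1) = pvWalk (w.length == t.length) w t false
      rw [show (w.length == t.length) = true by simp [heq], pvWalk_subst w t heq.symm,
        pvHam_comm t w]
    · rw [if_neg heq]
      by_cases hgt : t.length > w.length
      · have hlen : t.length = w.length + 1 := by omega
        rw [if_neg (show ¬ w.length > t.length by omega)]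
        show ((PySem.List.pyRange 0 ((if t.length > w.length then (t, w) else (w, t)).1.length : Int) 1).any
            (fun i => (PySem.List.slice (if t.length > w.length then (t, w) else (w, t)).1 none (some i) ++
              PySem.List.slice (if t.length > w.length then (t, w) else (w, t)).1 (some (i + 1)) none) ==
              (if t.length > w.length then (t, w) else (w, t)).2))
          = pvWalk (w.length == t.length) w t false
        rw [if_pos hgt]
        show ((PySem.List.pyRange 0 ((t.length : Int)) 1).any
            (fun i => (PySem.List.slice t none (some i) ++ PySem.List.slice t (some (i + 1)) none) == w))
          = pvWalk (w.length == t.length) w t false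
        rw [pvSliceScan t w, show (w.length == t.length) = false by simp [hlen]]
        exact (pvWalk_del w t hlen).symm
      · have hlen : w.length = t.length + 1 := by omega
        have hgt' : w.length > t.length := by omega
        rw [if_pos hgt']
        show ((PySem.List.pyRange 0 ((if t.length > w.length then (t, w) else (w, t)).1.length : Int) 1).any
            (fun i => (PySem.List.slice (if t.length > w.length then (t, w) else (w, t)).1 none (some i) ++
              PySem.List.slice (if t.length > w.length then (t, w) else (w, t)).1 (some (i + 1)) none) ==
              (if t.length > w.length then (t, w) else (w, t)).2))
          = pvWalk (t.length == w.length) t w false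
        rw [if_neg hgt]
        show ((PySem.List.pyRange 0 ((w.length : Int)) 1).any
            (fun i => (PySem.List.slice w none (some i) ++ PySem.List.slice w (some (i + 1)) none) == t))
          = pvWalk (t.length == w.length) t w false
        rw [pvSliceScan w t, show (t.length == w.length) = false by simp [hlen]]
        exact (pvWalk_del t w hlen).symm

-- A's scan loop is B's any over tokens
theorem pvLoop_eq_any (w : List Char) : ∀ (ts : List (List Char)),
    pvALoop w ts = ts.any (fun t => pvWithinOneEdit w t) := by
  intro ts
  induction ts with
  | nil => simp [pvALoop]
  | cons t rest ih =>
    rw [List.any_cons, ← ih, ← pvPerToken w t]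
    by_cases hgap : ((t.length : Int) - (w.length : Int)).natAbs > 1
    · rw [if_pos hgap]
      simp only [pvALoop, if_pos hgap]
      simp
    · rw [if_neg hgap]
      by_cases heq : t.length = w.length
      · rw [if_pos heq]
        simp only [pvALoop, if_neg hgap, if_pos heq]
        by_cases hham : pvHam t w ≤ 1
        · rw [if_pos hham]
          simp [hham]
        · rw [if_neg hham]
          simp [hham]
      · rw [if_neg heq]
        simp only [pvALoop, if_neg hgap, if_neg heq]
        cases hE : ((PySem.List.pyRange 0 ((if t.length > w.length then (t, w) else (w, t)).1.length : Int) 1).any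
            (fun i => (PySem.List.slice (if t.length > w.length then (t, w) else (w, t)).1 none (some i) ++
              PySem.List.slice (if t.length > w.length then (t, w) else (w, t)).1 (some (i + 1)) none) ==
              (if t.length > w.length then (t, w) else (w, t)).2)) with
        | false => simp
        | true => simp

-- exact membership is subsumed by the substring test
theorem pvContains_imp_isIn (w : List Char) (ts : List (List Char)) (h : ts.contains w = true) :
    ts.any (fun t => PySem.Chars.isIn w t) = true := by
  have hmem : w ∈ ts := by simpa using h
  refine List.any_eq_true.mpr ⟨w, hmem, ?_⟩
  exact (PySem.Chars.isIn_iff_infix w w).mpr (List.infix_refl w)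

-- ===== VERDICT (by name: the statement is the Claim_ definition above) =====
theorem fuzzy_word_in_text_py_spec : Claim_equal_fuzzy_word_in_text_py := by
  intro word text_tokens _
  unfold Spec_fuzzy_word_in_text_py fuzzy_word_in_text_py fuzzy_word_in_text_py_alt
  simp only []
  set w := word.toList
  set ts := text_tokens.map String.toList with hts
  by_cases hc : ts.contains w = true
  · rw [hc, pvContains_imp_isIn w ts hc]
    simp
  · simp only [Bool.not_eq_true] at hc
    rw [hc, Bool.false_or]
    by_cases hin : ts.any (fun t => PySem.Chars.isIn w t) = true
    · rw [hin]; simp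
    · simp only [Bool.not_eq_true] at hin
      rw [hin]
      simp only [if_neg (Bool.false_ne_true)]
      by_cases hlen : w.length < 6
      · simp [hlen]
      · simp [hlen, pvLoop_eq_any w ts]
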